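-- pv_equiv track=rewrite | github.com/miliar/Code_Jam_Webscraper | solutions_python/solutions_year16_round1_nr1/1624.py | lastword
-- ===== SOURCE A (Python) =====
-- def maxindex(a_list):
--     l = len(a_list)
--     index = l-1
--     char = a_list[-1]
--     for j in range(l-1, -1, -1):
--         if a_list[j] > char:
--             char = a_list[j]
--             index = j
--     return index
--
-- def lastword(string):
--     letters = [c for c in string]
--     index = maxindex(letters)
--     output = ""
--     while index != 0:
--         output += letters[index]
--         letters = letters[:index] + letters[index+1:]
--         index = maxindex(letters[:index])
--     output += ''.join(letters)
--     return output
-- ===== SOURCE B (Python) =====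
-- def lastword(string):
--     front = []
--     rest = []
--     mx = None
--     for c in string:
--         if mx is None or c >= mx:
--             front.append(c)
--             mx = c
--         else:
--             rest.append(c)
--     return ''.join(reversed(front)) + ''.join(rest)
-- ===== Notes on version B (the rewrite author's own statement) =====
-- stated objective: faster
-- what changed: A repeatedly rescans the remaining list for the rightmost maximum and rebuilds the list by slicing (O(n^2)); B makes a single left-to-right pass keeping a running maximum, collecting each char that is >= the running max into a front list (emitted reversed) and all others into a rest list (O(n)).
import Mathlib
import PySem

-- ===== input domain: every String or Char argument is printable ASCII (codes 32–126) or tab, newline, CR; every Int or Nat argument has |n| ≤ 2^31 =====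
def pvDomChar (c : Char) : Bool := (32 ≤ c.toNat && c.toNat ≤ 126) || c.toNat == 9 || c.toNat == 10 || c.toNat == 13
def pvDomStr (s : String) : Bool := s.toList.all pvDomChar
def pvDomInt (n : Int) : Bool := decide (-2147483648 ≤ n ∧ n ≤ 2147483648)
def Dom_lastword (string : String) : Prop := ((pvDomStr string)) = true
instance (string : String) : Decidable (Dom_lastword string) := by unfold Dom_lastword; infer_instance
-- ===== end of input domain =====

-- B replaces A's repeated rightmost-maximum rescans (O(n^2)) by a single pass with a running
-- maximum (O(n)); Pre_ excludes only the empty string, on which A raises IndexError (B returns "").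


-- ===== PORT A =====
-- one step of maxindex's backwards scan: `if a_list[j] > char: char, index = a_list[j], j`
def mxStep (a : List Char) (st : Char × Int) (j : Int) : Char × Int :=
  match PySem.List.pyGet? a j with
  | some cj => if st.1 < cj then (cj, j) else st
  | none => st    -- unreachable: j ranges over valid indices (totality guard)

-- maxindex; `none` exactly where Python raises IndexError (`a_list[-1]` on the empty list)
def maxindex? (a : List Char) : Option Int :=
  match PySem.List.pyGet? a (-1) with
  | none => none
  | some c0 =>
      some (((PySem.List.pyRange ((a.length : Int) - 1) (-1) (-1)).foldl (mxStep a)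
        (c0, (a.length : Int) - 1)).2)

-- the `while index != 0` loop of lastword; output kept as List Char, joined at the end.
-- Python only ever reaches this loop with 0 ≤ index, so `index ≠ 0` is transliterated as
-- `0 < index`; the Nat fuel (each iteration removes one element, so `letters.length` suffices,
-- see loop_spec below) and the unreachable pyGet?-none branch are totality guards only.
def lastwordLoop : Nat → List Char → Int → List Char → List Char
  | 0, letters, _, output => output ++ letters
  | fuel + 1, letters, index, output =>
    if 0 < index then
      match PySem.List.pyGet? letters index with
      | none => output ++ letters    -- unreachable (totality guard)
      | some ch =>
        let letters' := PySem.List.slice letters none (some index) ++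
                        PySem.List.slice letters (some (index + 1)) none
        let index' := (maxindex? (PySem.List.slice letters' none (some index))).getD 0
        lastwordLoop fuel letters' index' (output ++ [ch])
    else output ++ letters

def lastword (string : String) : String :=
  let letters := string.toList
  match maxindex? letters with
  | none => ""    -- unreachable under Pre_: Python raises IndexError on ""
  | some index => String.ofList (lastwordLoop letters.length letters index [])

-- ===== PORT B =====
-- `mx is None or c >= mx`
def bGuard (mx : Option Char) (c : Char) : Bool :=
  match mx with
  | none => true
  | some m => decide (m ≤ c)

-- one step of B's single pass
def bStep (st : List Char × List Char × Option Char) (c : Char) :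
    List Char × List Char × Option Char :=
  if bGuard st.2.2 c then (st.1 ++ [c], st.2.1, some c) else (st.1, st.2.1 ++ [c], st.2.2)

def lastword_alt (string : String) : String :=
  let st := string.toList.foldl bStep ([], [], none)
  String.ofList (st.1.reverse ++ st.2.1)

-- ===== PRECONDITION & SPEC =====
-- Pre_ excludes exactly the empty string: there Python's A raises IndexError (a_list[-1]).
def Pre_lastword (string : String) : Prop := string ≠ ""
instance (string : String) : Decidable (Pre_lastword string) := by unfold Pre_lastword; infer_instance
def pvWitness_lastword : String := "ba"

def Spec_lastword (string : String) (out : String) : Prop := out = lastword_alt string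
instance (string : String) (out : String) : Decidable (Spec_lastword string out) := by unfold Spec_lastword; infer_instance

-- ===== CLAIM (what is proved, stated in full; the proofs are below) =====
def Claim_equal_lastword : Prop := ∀ (string : String), Dom_lastword string → Pre_lastword string → Spec_lastword string (lastword string)
-- ===== LEMMAS AND PROOFS =====

-- the record/non-record split B computes, in direct recursive form (proof-side mirror of bStep)
def splitRec (mx : Option Char) : List Char → List Char × List Char
  | [] => ([], [])
  | c :: cs =>
    if bGuard mx c then ((splitRec (some c) cs).1.cons c, (splitRec (some c) cs).2)
    else ((splitRec mx cs).1, (splitRec mx cs).2.cons c)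

lemma bfold_eq_splitRec (cs : List Char) : ∀ (front rest : List Char) (mx : Option Char),
    (cs.foldl bStep (front, rest, mx)).1 = front ++ (splitRec mx cs).1 ∧
    (cs.foldl bStep (front, rest, mx)).2.1 = rest ++ (splitRec mx cs).2 := by
  induction cs with
  | nil => intro front rest mx; simp [splitRec]
  | cons c cs ih =>
    intro front rest mx
    simp only [List.foldl_cons, bStep, splitRec]
    by_cases h : bGuard mx c = true
    · simpa [h] using ih (front ++ [c]) rest (some c)
    · simp only [h] at *
      simpa [h] using ih front (rest ++ [c]) mx


lemma splitRec_all_lt (v : Char) : ∀ (l : List Char), (∀ c ∈ l, c < v) →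
    splitRec (some v) l = ([], l) := by
  intro l
  induction l with
  | nil => intro _; rfl
  | cons c cs ih =>
    intro h
    have hc : c < v := h c (by simp)
    have : bGuard (some v) c = false := by simp [bGuard]; exact hc
    simp [splitRec, this, ih (fun x hx => h x (by simp [hx]))]


lemma splitRec_append_max (m : Char) : ∀ (l1 : List Char) (mx : Option Char) (l2 : List Char),
    (∀ c ∈ l1, c ≤ m) → (∀ c ∈ l2, c < m) → (∀ v, mx = some v → v ≤ m) →
    splitRec mx (l1 ++ m :: l2) = ((splitRec mx l1).1 ++ [m], (splitRec mx l1).2 ++ l2) := by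
  intro l1
  induction l1 with
  | nil =>
    intro mx l2 _ h2 hmx
    have hg : bGuard mx m = true := by
      cases mx with
      | none => rfl
      | some v => simp [bGuard]; exact hmx v rfl
    simp [splitRec, hg, splitRec_all_lt m l2 h2]
  | cons c cs ih =>
    intro mx l2 h1 h2 hmx
    have hc : c ≤ m := h1 c (by simp)
    have ihh := ih (if bGuard mx c then some c else mx) l2 (fun x hx => h1 x (by simp [hx])) h2
    by_cases h : bGuard mx c = true
    · have := ih (some c) l2 (fun x hx => h1 x (by simp [hx])) h2
        (fun v hv => by injection hv with hv; exact hv ▸ hc)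
      simp [List.cons_append, splitRec, h, this]
    · have := ih mx l2 (fun x hx => h1 x (by simp [hx])) h2 hmx
      simp [List.cons_append, splitRec, h, this]


lemma maxindex_isSome (a : List Char) (ha : a ≠ []) : ∃ i, maxindex? a = some i := by
  obtain ⟨c0, h0⟩ := Option.isSome_iff_exists.mp (List.getLast?_isSome.mpr ha)
  exact ⟨_, by rw [maxindex?, PySem.List.pyGet?_neg_one, h0]⟩


lemma mxFold_inv (a : List Char) (c0 : Char) (h0 : a.getLast? = some c0) :
    ∀ (n t : Nat), a.length - t ≤ n → t < a.length →
    ∃ p : Nat, ∃ hp : p < a.length, t ≤ p ∧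
      List.foldr (fun j st => mxStep a st j) (c0, (a.length : Int) - 1)
        (PySem.List.pyRange (t : Int) (a.length : Int) 1) = (a[p], (p : Int)) ∧
      (∀ k (hk : k < a.length), t ≤ k → a[k] ≤ a[p]) ∧
      (∀ k (hk : k < a.length), p < k → a[k] < a[p]) := by
  intro n
  induction n with
  | zero => intro t h1 h2; omega
  | succ n ih =>
    intro t h1 h2
    have hlast : c0 = a[a.length - 1]'(by omega) := by
      rw [List.getLast?_eq_getElem?] at h0
      have := List.getElem?_eq_getElem (l := a) (i := a.length - 1) (by omega)
      rw [this] at h0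
      exact (Option.some_injective _ h0).symm
    by_cases hT : t = a.length - 1
    · -- base: the range is the singleton [t]
      subst hT
      have hsing : PySem.List.pyRange ((a.length - 1 : Nat) : Int) (a.length : Int) 1
          = [((a.length - 1 : Nat) : Int)] := by
        have : ((a.length : Nat) : Int) = ((a.length - 1 : Nat) : Int) + 1 := by omega
        rw [this, PySem.List.pyRange_one_singleton]
      rw [hsing]
      refine ⟨a.length - 1, by omega, le_refl _, ?_, ?_, ?_⟩
      · simp only [List.foldr, mxStep]
        rw [PySem.List.pyGet?_natCast]
        rw [List.getElem?_eq_getElem (by omega)]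
        simp [← hlast]
        omega
      · intro k hk hle
        have : k = a.length - 1 := by omega
        subst this; exact le_refl _
      · intro k hk hlt; omega
    · -- step
      have ht1 : t + 1 < a.length := by omega
      obtain ⟨p, hp, htp, hfold, hmax, hright⟩ := ih (t + 1) (by omega) ht1
      have hcons : PySem.List.pyRange (t : Int) (a.length : Int) 1
          = (t : Int) :: PySem.List.pyRange ((t : Int) + 1) (a.length : Int) 1 :=
        PySem.List.pyRange_one_cons (by exact_mod_cast h2)
      have hcast : ((t : Int) + 1) = ((t + 1 : Nat) : Int) := by push_cast; ring
      rw [hcons, List.foldr_cons, hcast, hfold]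
      simp only [mxStep]
      rw [PySem.List.pyGet?_natCast, List.getElem?_eq_getElem h2]
      by_cases hgt : a[p] < a[t]
      · refine ⟨t, h2, le_refl _, by simp [hgt], ?_, ?_⟩
        · intro k hk hle
          rcases Nat.eq_or_lt_of_le hle with h | h
          · subst h; exact le_refl _
          · exact le_of_lt (lt_of_le_of_lt (hmax k hk h) hgt)
        · intro k hk hlt
          exact lt_of_le_of_lt (hmax k hk hlt) hgt
      · refine ⟨p, hp, by omega, by simp [hgt], ?_, hright⟩
        intro k hk hle
        rcases Nat.eq_or_lt_of_le hle with h | h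
        · subst h; exact le_of_not_gt hgt
        · exact hmax k hk h


lemma maxindex_spec (a : List Char) (i : Int) (hm : maxindex? a = some i) :
    ∃ p : Nat, ∃ hp : p < a.length, i = (p : Int) ∧
      (∀ k (hk : k < a.length), a[k] ≤ a[p]) ∧
      (∀ k (hk : k < a.length), p < k → a[k] < a[p]) := by
  have ha : a ≠ [] := by
    rintro rfl
    rw [maxindex?, PySem.List.pyGet?_neg_one] at hm
    simp at hm
  obtain ⟨c0, h0⟩ := Option.isSome_iff_exists.mp (List.getLast?_isSome.mpr ha)
  rw [maxindex?, PySem.List.pyGet?_neg_one, h0] at hm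
  simp only [] at hm
  have hrange : PySem.List.pyRange ((a.length : Int) - 1) (-1) (-1)
      = (PySem.List.pyRange 0 (a.length : Int) 1).reverse := by
    rw [PySem.List.pyRange_neg_one_eq_reverse]
    norm_num
  rw [hrange, List.foldl_reverse] at hm
  obtain ⟨p, hp, _, hfold, hmax, hright⟩ :=
    mxFold_inv a c0 h0 a.length 0 (by omega) (List.length_pos_iff.mpr ha)
  rw [Nat.cast_zero] at hfold
  rw [hfold] at hm
  exact ⟨p, hp, (Option.some_injective _ hm).symm, fun k hk => hmax k hk (Nat.zero_le k), fun k hk h => hright k hk h⟩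


lemma loop_spec : ∀ (n : Nat) (pre suf out : List Char) (i : Int),
    pre.length ≤ n → pre ≠ [] → maxindex? pre = some i →
    lastwordLoop n (pre ++ suf) i out =
      out ++ (splitRec none pre).1.reverse ++ ((splitRec none pre).2 ++ suf) := by
  intro n
  induction n with
  | zero =>
    intro pre suf out i hlen hne _
    exact absurd (List.length_eq_zero_iff.mp (Nat.le_zero.mp hlen)) hne
  | succ n ih =>
    intro pre suf out i hlen hne hmi
    obtain ⟨p, hp, rfl, hmax, hright⟩ := maxindex_spec pre i hmi
    by_cases hp0 : p = 0
    · subst hp0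
      rw [lastwordLoop]
      rw [if_neg (by norm_num)]
      cases pre with
      | nil => exact absurd rfl hne
      | cons c cs =>
        have hlt : ∀ x ∈ cs, x < c := by
          intro x hx
          obtain ⟨k, hk, rfl⟩ := List.mem_iff_getElem.mp hx
          exact hright (k + 1) (by simpa using hk) (Nat.succ_pos k)
        simp [splitRec, bGuard, splitRec_all_lt c cs hlt]
    · have hp1 : 1 ≤ p := Nat.one_le_iff_ne_zero.mpr hp0
      rw [lastwordLoop]
      rw [if_pos (by exact_mod_cast hp1)]
      have hget : PySem.List.pyGet? (pre ++ suf) (p : Int) = some (pre[p]'hp) := by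
        rw [PySem.List.pyGet?_natCast]
        rw [List.getElem?_eq_getElem (by simp; omega)]
        rw [List.getElem_append_left hp]
      rw [hget]
      have hs1 : PySem.List.slice (pre ++ suf) none (some (p : Int)) = pre.take p := by
        rw [PySem.List.slice_to_natCast, List.take_append_of_le_length (le_of_lt hp)]
      have hs2 : PySem.List.slice (pre ++ suf) (some ((p : Int) + 1)) none
          = pre.drop (p + 1) ++ suf := by
        rw [show ((p : Int) + 1) = ((p + 1 : Nat) : Int) by push_cast; ring,
          PySem.List.slice_from_natCast, List.drop_append_of_le_length (by omega)]
      simp only [hs1, hs2]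
      have hlentake : (pre.take p).length = p := by simp; omega
      have hs3 : PySem.List.slice (pre.take p ++ (pre.drop (p + 1) ++ suf)) none (some (p : Int))
          = pre.take p := by
        rw [PySem.List.slice_to_natCast, List.take_append_of_le_length (le_of_eq hlentake.symm),
          List.take_take]
        simp
      rw [hs3]
      have htne : pre.take p ≠ [] := by
        intro h; rw [h] at hlentake; simp at hlentake; omega
      obtain ⟨i', hi'⟩ := maxindex_isSome (pre.take p) htne
      rw [hi']
      have ihres := ih (pre.take p) (pre.drop (p + 1) ++ suf) (out ++ [pre[p]'hp]) i'
        (by omega) htne hi'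
      simp only [Option.getD_some]
      rw [ihres]
      -- now rewrite splitRec none pre via the decomposition at p
      have hdec : pre = pre.take p ++ pre[p]'hp :: pre.drop (p + 1) := by
        conv_lhs => rw [← List.take_append_drop p pre]
        rw [List.drop_eq_getElem_cons hp]
      have c1 : ∀ c ∈ pre.take p, c ≤ pre[p]'hp := by
        intro x hx
        obtain ⟨k, hk, rfl⟩ := List.mem_iff_getElem.mp hx
        rw [List.getElem_take]
        exact hmax k (by simp at hk; omega) 
      have c2 : ∀ c ∈ pre.drop (p + 1), c < pre[p]'hp := by
        intro x hx
        obtain ⟨k, hk, rfl⟩ := List.mem_iff_getElem.mp hx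
        rw [List.getElem_drop]
        exact hright (p + 1 + k) (by simp at hk; omega) (by omega)
      have hsplit := splitRec_append_max (pre[p]'hp) (pre.take p) none (pre.drop (p + 1)) c1 c2
        (by intro v hv; cases hv)
      conv_rhs => rw [hdec, hsplit]
      simp


lemma lastword_eq_alt (s : String) (hpre : s ≠ "") : lastword s = lastword_alt s := by
  have hne : s.toList ≠ [] := by
    intro h
    apply hpre
    have := congrArg String.ofList h
    simpa using this
  obtain ⟨i, hi⟩ := maxindex_isSome s.toList hne
  obtain ⟨h1, h2⟩ := bfold_eq_splitRec s.toList [] [] none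
  rw [lastword, lastword_alt]
  simp only [hi, h1, h2, List.nil_append]
  have hl := loop_spec s.toList.length s.toList [] [] i le_rfl hne hi
  simp only [List.append_nil, List.nil_append] at hl
  rw [hl]

-- ===== VERDICT (by name: the statement is the Claim_ definition above) =====
theorem lastword_spec : Claim_equal_lastword := by
  intro s _ hpre
  exact lastword_eq_alt s hpre
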